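-- pv_equiv track=rewrite | github.com/ferdousulhaque/problem-solving-bootcamp | assignment04/test.py | noOfEvenDaysInAYearNaive
-- ===== SOURCE A (Python) =====
-- def noOfEvenDaysInAYearNaive(yearsFrom, yearsTo):
--     days = 0
--     years = (yearsTo - yearsFrom) + 1
--     # Naive Solution O(n^3)
--     for year in range(years):
--         for month in range(1,13):
--             for day in range(1,31):
--                 if(day % 2 == 0):
--                     days += 1
--     return days
-- ===== SOURCE B (Python) =====
-- def noOfEvenDaysInAYearNaive(yearsFrom, yearsTo):
--     # Closed form: each year contributes 12 months * 15 even days = 180.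
--     years = (yearsTo - yearsFrom) + 1
--     return 180 * years if years > 0 else 0
-- ===== Notes on version B (the rewrite author's own statement) =====
-- stated objective: faster
-- what changed: Replaced the triple nested loop (years x 12 months x 30 days) with the closed form 180*years (0 when the range is empty), since every year contributes exactly 12*15 even days.
import Mathlib
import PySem

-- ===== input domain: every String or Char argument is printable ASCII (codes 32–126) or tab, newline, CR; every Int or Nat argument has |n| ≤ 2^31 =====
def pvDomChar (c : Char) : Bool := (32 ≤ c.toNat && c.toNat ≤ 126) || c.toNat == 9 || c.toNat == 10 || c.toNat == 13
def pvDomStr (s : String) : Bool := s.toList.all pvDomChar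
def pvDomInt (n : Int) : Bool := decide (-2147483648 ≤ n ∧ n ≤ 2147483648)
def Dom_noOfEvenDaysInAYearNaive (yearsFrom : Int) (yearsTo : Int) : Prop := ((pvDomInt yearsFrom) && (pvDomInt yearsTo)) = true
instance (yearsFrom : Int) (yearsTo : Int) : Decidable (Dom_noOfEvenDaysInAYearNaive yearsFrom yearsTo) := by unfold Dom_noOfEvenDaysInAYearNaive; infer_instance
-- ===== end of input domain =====

-- B replaces A's triple nested loop with the closed form 180*(yearsTo-yearsFrom+1), clamped at 0; O(1) vs O(n).


-- ===== PORT A =====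
-- Literal port of A: triple nested loop over range(years), range(1,13), range(1,31).
def noOfEvenDaysInAYearNaive (yearsFrom : Int) (yearsTo : Int) : Int :=
  let years : Int := (yearsTo - yearsFrom) + 1
  (PySem.List.pyRange 0 years 1).foldl (fun days _year =>
    (PySem.List.pyRange 1 13 1).foldl (fun days _month =>
      (PySem.List.pyRange 1 31 1).foldl (fun days day =>
        if day % 2 == 0 then days + 1 else days) days) days) 0

-- ===== PORT B =====
-- B: closed form, 180 even days per year.
def noOfEvenDaysInAYearNaive_alt (yearsFrom : Int) (yearsTo : Int) : Int :=
  let years : Int := (yearsTo - yearsFrom) + 1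
  if years > 0 then 180 * years else 0

-- ===== PRECONDITION & SPEC =====
def Spec_noOfEvenDaysInAYearNaive (yearsFrom : Int) (yearsTo : Int) (out : Int) : Prop := out = noOfEvenDaysInAYearNaive_alt yearsFrom yearsTo
instance (yearsFrom : Int) (yearsTo : Int) (out : Int) : Decidable (Spec_noOfEvenDaysInAYearNaive yearsFrom yearsTo out) := by unfold Spec_noOfEvenDaysInAYearNaive; infer_instance

-- ===== CLAIM (what is proved, stated in full; the proofs are below) =====
def Claim_equal_noOfEvenDaysInAYearNaive : Prop := ∀ (yearsFrom : Int) (yearsTo : Int), Dom_noOfEvenDaysInAYearNaive yearsFrom yearsTo → Spec_noOfEvenDaysInAYearNaive yearsFrom yearsTo (noOfEvenDaysInAYearNaive yearsFrom yearsTo)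

-- ===== LEMMAS AND PROOFS =====

-- ===== VERDICT (by name: the statement is the Claim_ definition above) =====
-- each year's inner double loop adds exactly 180 to the accumulator
lemma pv_inner (x : Int) :
    (PySem.List.pyRange 1 13 1).foldl (fun days _month =>
      (PySem.List.pyRange 1 31 1).foldl (fun days day =>
        if day % 2 == 0 then days + 1 else days) days) x = x + 180 := by
  have h : PySem.List.pyRange 1 13 1 = [1,2,3,4,5,6,7,8,9,10,11,12] := by decide
  have h2 : PySem.List.pyRange 1 31 1 =
      [1,2,3,4,5,6,7,8,9,10,11,12,13,14,15,16,17,18,19,20,21,22,23,24,25,26,27,28,29,30] := by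
    decide
  simp [h, h2, List.foldl]
  ring

lemma pv_outer (l : List Int) (x : Int) :
    l.foldl (fun days _year =>
      (PySem.List.pyRange 1 13 1).foldl (fun days _month =>
        (PySem.List.pyRange 1 31 1).foldl (fun days day =>
          if day % 2 == 0 then days + 1 else days) days) days) x
    = x + 180 * l.length := by
  induction l generalizing x with
  | nil => simp
  | cons a t ih => rw [List.foldl_cons, pv_inner, ih]; push_cast [List.length_cons]; ring

theorem noOfEvenDaysInAYearNaive_spec : Claim_equal_noOfEvenDaysInAYearNaive := by
  intro yearsFrom yearsTo _
  unfold Spec_noOfEvenDaysInAYearNaive noOfEvenDaysInAYearNaive noOfEvenDaysInAYearNaive_alt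
  rw [pv_outer]
  rw [PySem.List.length_pyRange_one]
  by_cases h : yearsTo - yearsFrom + 1 > 0 <;> simp [h] <;> omega
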